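-- pv_equiv track=rewrite | github.com/GCaggianese/AoC-2025 | D4/draft.py | add_neighbors
-- ===== SOURCE A (Python) =====
-- def add_neighbors(mat):
--     rows = len(mat)
--     cols = len(mat[0])
--     result = [[0] * cols for _ in range(rows)]
--
--     directions = [
--         (-1, -1), (-1, 0), (-1, 1),
--         (0, -1),           (0, 1),
--         (1, -1),  (1, 0),  (1, 1)
--     ]
--
--     for i in range(rows):
--         for j in range(cols):
--             neighbor_sum = 0
--             for di, dj in directions:
--                 ni, nj = i + di, j + dj
--                 if 0 <= ni < rows and 0 <= nj < cols:
--                     neighbor_sum += mat[ni][nj]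
--             result[i][j] = mat[i][j] + neighbor_sum
--
--     return result
-- ===== SOURCE B (Python) =====
-- def add_neighbors(mat):
--     rows = len(mat)
--     cols = len(mat[0])
--     zero = [0] * cols
--
--     def hsum(row):
--         return [(row[j - 1] if j > 0 else 0) + row[j] +
--                 (row[j + 1] if j + 1 < cols else 0)
--                 for j in range(cols)]
--
--     hs = [hsum(row) for row in mat]
--     result = []
--     for i in range(rows):
--         up = hs[i - 1] if i > 0 else zero
--         down = hs[i + 1] if i + 1 < rows else zero
--         cur = hs[i]
--         result.append([up[j] + cur[j] + down[j] for j in range(cols)])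
--     return result
-- ===== Notes on version B (the rewrite author's own statement) =====
-- stated objective: faster
-- what changed: Replaces the 8-direction bounds-checked inner scan per cell with a separable convolution: one pass of horizontal 3-sums per row, then one pass adding the rows above/below, so no per-neighbor bounds checks remain.
import Mathlib
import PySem

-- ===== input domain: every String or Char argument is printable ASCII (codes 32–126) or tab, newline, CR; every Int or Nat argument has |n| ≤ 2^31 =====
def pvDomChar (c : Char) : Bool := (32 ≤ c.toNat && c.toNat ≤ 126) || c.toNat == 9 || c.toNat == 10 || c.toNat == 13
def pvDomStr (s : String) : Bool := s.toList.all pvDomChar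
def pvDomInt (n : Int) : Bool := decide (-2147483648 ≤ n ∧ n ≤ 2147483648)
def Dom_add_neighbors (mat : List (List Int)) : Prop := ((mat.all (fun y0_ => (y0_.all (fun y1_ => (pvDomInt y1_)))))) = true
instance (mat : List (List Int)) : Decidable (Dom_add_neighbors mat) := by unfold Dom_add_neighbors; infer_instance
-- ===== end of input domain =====

-- B replaces A's per-cell scan over 8 bounds-checked directions by a separable pass:
-- horizontal 3-sums per row, then a vertical pass adding the rows above/below (constant-factor objective).
-- ===== PORT A =====

def pyDirections : List (Int × Int) :=
  [(-1,-1),(-1,0),(-1,1),(0,-1),(0,1),(1,-1),(1,0),(1,1)]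

def add_neighbors (mat : List (List Int)) : List (List Int) :=
  (List.range mat.length).map (fun i =>
    (List.range (mat.headD []).length).map (fun j =>
      (mat.getD i []).getD j 0 +
        pyDirections.foldl (fun s d =>
          if 0 ≤ (i:Int) + d.1 ∧ (i:Int) + d.1 < (mat.length:Int) ∧
             0 ≤ (j:Int) + d.2 ∧ (j:Int) + d.2 < (((mat.headD []).length : Nat) : Int) then
            s + (mat.getD ((i:Int) + d.1).toNat []).getD ((j:Int) + d.2).toNat 0
          else s) 0))

def hsumB (cols : Nat) (row : List Int) : List Int :=
  (List.range cols).map (fun j =>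
    (if 0 < j then row.getD (j-1) 0 else 0) + row.getD j 0 +
    (if j+1 < cols then row.getD (j+1) 0 else 0))

-- ===== PORT B =====
def add_neighbors_alt (mat : List (List Int)) : List (List Int) :=
  (List.range mat.length).map (fun i =>
    (List.range (mat.headD []).length).map (fun j =>
      (if 0 < i then (mat.map (hsumB (mat.headD []).length)).getD (i-1) []
       else List.replicate (mat.headD []).length 0).getD j 0 +
      ((mat.map (hsumB (mat.headD []).length)).getD i []).getD j 0 +
      (if i+1 < mat.length then (mat.map (hsumB (mat.headD []).length)).getD (i+1) []
       else List.replicate (mat.headD []).length 0).getD j 0))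


-- ===== PRECONDITION & SPEC =====
-- Pre_ excludes exactly the inputs on which Python A raises IndexError: the empty matrix
-- (len(mat[0]) fails) and matrices with some row shorter than the first row (mat[ni][nj] fails).
def Pre_add_neighbors (mat : List (List Int)) : Prop :=
  mat ≠ [] ∧ ∀ row ∈ mat, (mat.headD []).length ≤ row.length
instance (mat : List (List Int)) : Decidable (Pre_add_neighbors mat) := by
  unfold Pre_add_neighbors; infer_instance
def pvWitness_add_neighbors : List (List Int) := [[1, 2], [3, 4]]
def Spec_add_neighbors (mat : List (List Int)) (out : List (List Int)) : Prop := out = add_neighbors_alt mat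
instance (mat : List (List Int)) (out : List (List Int)) : Decidable (Spec_add_neighbors mat out) := by unfold Spec_add_neighbors; infer_instance

-- ===== CLAIM (what is proved, stated in full; the proofs are below) =====
def Claim_equal_add_neighbors : Prop := ∀ (mat : List (List Int)), Dom_add_neighbors mat → Pre_add_neighbors mat → Spec_add_neighbors mat (add_neighbors mat)

-- ===== LEMMAS AND PROOFS =====
lemma foldstep (P : Prop) [Decidable P] (s x : Int) :
    (if P then s + x else s) = s + (if P then x else 0) := by split_ifs <;> simp

lemma hs_getD (c : Nat) (mat : List (List Int)) (k : Nat) (hk : k < mat.length) :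
    (mat.map (hsumB c)).getD k [] = hsumB c (mat.getD k []) := by
  simp [List.getD_eq_getElem?_getD, List.getElem?_map, List.getElem?_eq_getElem hk]

lemma hsum_getD (c : Nat) (row : List Int) (j : Nat) (hj : j < c) :
    (hsumB c row).getD j 0 =
      (if 0 < j then row.getD (j-1) 0 else 0) + row.getD j 0 +
      (if j+1 < c then row.getD (j+1) 0 else 0) := by
  simp [hsumB, List.getD_eq_getElem?_getD, List.getElem?_map, List.getElem?_range, hj]

lemma AB (mat : List (List Int)) : add_neighbors mat = add_neighbors_alt mat := by
  unfold add_neighbors add_neighbors_alt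
  refine List.map_congr_left (fun i hi => ?_)
  rw [List.mem_range] at hi
  refine List.map_congr_left (fun j hj => ?_)
  rw [List.mem_range] at hj
  have hrep : ∀ k, (List.replicate (mat.headD []).length (0:Int)).getD k 0 = 0 := by
    intro k
    simp [List.getD_eq_getElem?_getD, List.getElem?_replicate]
    split <;> simp
  rw [hs_getD _ _ _ hi]
  simp only [pyDirections, List.foldl, foldstep]
  by_cases h1 : 0 < i <;> by_cases h2 : i + 1 < mat.length
  · simp only [h1, h2, if_true, ite_true,
      hs_getD _ _ _ (show i - 1 < mat.length from by omega), hs_getD _ _ _ h2]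
    simp only [hsum_getD _ _ _ hj,
      show ((i:Int) + -1).toNat = i - 1 from by omega,
      show ((i:Int) + 0).toNat = i from by omega,
      show ((i:Int) + 1).toNat = i + 1 from by omega,
      show ((j:Int) + -1).toNat = j - 1 from by omega,
      show ((j:Int) + 0).toNat = j from by omega,
      show ((j:Int) + 1).toNat = j + 1 from by omega,
      show ((0:Int) ≤ (i:Int) + -1) ↔ 0 < i from by omega,
      show ((i:Int) + -1 < (mat.length:Int)) from by omega,
      show ((0:Int) ≤ (i:Int) + 0) from by omega,
      show ((i:Int) + 0 < (mat.length:Int)) from by omega,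
      show ((0:Int) ≤ (i:Int) + 1) from by omega,
      show ((i:Int) + 1 < (mat.length:Int)) ↔ i + 1 < mat.length from by omega,
      show ((0:Int) ≤ (j:Int) + -1) ↔ 0 < j from by omega,
      show ((j:Int) + -1 < ((mat.headD []).length:Int)) from by omega,
      show ((0:Int) ≤ (j:Int) + 0) from by omega,
      show ((j:Int) + 0 < ((mat.headD []).length:Int)) from by omega,
      show ((0:Int) ≤ (j:Int) + 1) from by omega,
      show ((j:Int) + 1 < ((mat.headD []).length:Int)) ↔ j + 1 < (mat.headD []).length from by omega,
      Int.toNat_natCast,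
      show ((0:Int) ≤ (i:Int)) from by omega,
      show ((i:Int) < (mat.length:Int)) from by omega,
      show ((0:Int) ≤ (j:Int)) from by omega,
      show ((j:Int) < ((mat.headD []).length:Int)) from by omega,
      h1, h2, true_and, and_true, false_and, and_false, if_true, if_false,
      ite_true, ite_false, add_zero, zero_add]
    ring
  · simp only [h1, h2, if_true, if_false, ite_true, ite_false, hrep,
      hs_getD _ _ _ (show i - 1 < mat.length from by omega)]
    simp only [hsum_getD _ _ _ hj,
      show ((i:Int) + -1).toNat = i - 1 from by omega,
      show ((i:Int) + 0).toNat = i from by omega,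
      show ((i:Int) + 1).toNat = i + 1 from by omega,
      show ((j:Int) + -1).toNat = j - 1 from by omega,
      show ((j:Int) + 0).toNat = j from by omega,
      show ((j:Int) + 1).toNat = j + 1 from by omega,
      show ((0:Int) ≤ (i:Int) + -1) ↔ 0 < i from by omega,
      show ((i:Int) + -1 < (mat.length:Int)) from by omega,
      show ((0:Int) ≤ (i:Int) + 0) from by omega,
      show ((i:Int) + 0 < (mat.length:Int)) from by omega,
      show ((0:Int) ≤ (i:Int) + 1) from by omega,
      show ((i:Int) + 1 < (mat.length:Int)) ↔ i + 1 < mat.length from by omega,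
      show ((0:Int) ≤ (j:Int) + -1) ↔ 0 < j from by omega,
      show ((j:Int) + -1 < ((mat.headD []).length:Int)) from by omega,
      show ((0:Int) ≤ (j:Int) + 0) from by omega,
      show ((j:Int) + 0 < ((mat.headD []).length:Int)) from by omega,
      show ((0:Int) ≤ (j:Int) + 1) from by omega,
      show ((j:Int) + 1 < ((mat.headD []).length:Int)) ↔ j + 1 < (mat.headD []).length from by omega,
      Int.toNat_natCast,
      show ((0:Int) ≤ (i:Int)) from by omega,
      show ((i:Int) < (mat.length:Int)) from by omega,
      show ((0:Int) ≤ (j:Int)) from by omega,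
      show ((j:Int) < ((mat.headD []).length:Int)) from by omega,
      h1, h2, true_and, and_true, false_and, and_false, if_true, if_false,
      ite_true, ite_false, add_zero, zero_add]
    ring
  · simp only [h1, h2, if_true, if_false, ite_true, ite_false, hrep,
      hs_getD _ _ _ (show i + 1 < mat.length from h2)]
    simp only [hsum_getD _ _ _ hj,
      show ((i:Int) + -1).toNat = i - 1 from by omega,
      show ((i:Int) + 0).toNat = i from by omega,
      show ((i:Int) + 1).toNat = i + 1 from by omega,
      show ((j:Int) + -1).toNat = j - 1 from by omega,
      show ((j:Int) + 0).toNat = j from by omega,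
      show ((j:Int) + 1).toNat = j + 1 from by omega,
      show ((0:Int) ≤ (i:Int) + -1) ↔ 0 < i from by omega,
      show ((i:Int) + -1 < (mat.length:Int)) from by omega,
      show ((0:Int) ≤ (i:Int) + 0) from by omega,
      show ((i:Int) + 0 < (mat.length:Int)) from by omega,
      show ((0:Int) ≤ (i:Int) + 1) from by omega,
      show ((i:Int) + 1 < (mat.length:Int)) ↔ i + 1 < mat.length from by omega,
      show ((0:Int) ≤ (j:Int) + -1) ↔ 0 < j from by omega,
      show ((j:Int) + -1 < ((mat.headD []).length:Int)) from by omega,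
      show ((0:Int) ≤ (j:Int) + 0) from by omega,
      show ((j:Int) + 0 < ((mat.headD []).length:Int)) from by omega,
      show ((0:Int) ≤ (j:Int) + 1) from by omega,
      show ((j:Int) + 1 < ((mat.headD []).length:Int)) ↔ j + 1 < (mat.headD []).length from by omega,
      Int.toNat_natCast,
      show ((0:Int) ≤ (i:Int)) from by omega,
      show ((i:Int) < (mat.length:Int)) from by omega,
      show ((0:Int) ≤ (j:Int)) from by omega,
      show ((j:Int) < ((mat.headD []).length:Int)) from by omega,
      h1, h2, true_and, and_true, false_and, and_false, if_true, if_false,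
      ite_true, ite_false, add_zero, zero_add]
    ring
  · simp only [h1, h2, if_false, ite_false, hrep]
    simp only [hsum_getD _ _ _ hj,
      show ((i:Int) + -1).toNat = i - 1 from by omega,
      show ((i:Int) + 0).toNat = i from by omega,
      show ((i:Int) + 1).toNat = i + 1 from by omega,
      show ((j:Int) + -1).toNat = j - 1 from by omega,
      show ((j:Int) + 0).toNat = j from by omega,
      show ((j:Int) + 1).toNat = j + 1 from by omega,
      show ((0:Int) ≤ (i:Int) + -1) ↔ 0 < i from by omega,
      show ((i:Int) + -1 < (mat.length:Int)) from by omega,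
      show ((0:Int) ≤ (i:Int) + 0) from by omega,
      show ((i:Int) + 0 < (mat.length:Int)) from by omega,
      show ((0:Int) ≤ (i:Int) + 1) from by omega,
      show ((i:Int) + 1 < (mat.length:Int)) ↔ i + 1 < mat.length from by omega,
      show ((0:Int) ≤ (j:Int) + -1) ↔ 0 < j from by omega,
      show ((j:Int) + -1 < ((mat.headD []).length:Int)) from by omega,
      show ((0:Int) ≤ (j:Int) + 0) from by omega,
      show ((j:Int) + 0 < ((mat.headD []).length:Int)) from by omega,
      show ((0:Int) ≤ (j:Int) + 1) from by omega,
      show ((j:Int) + 1 < ((mat.headD []).length:Int)) ↔ j + 1 < (mat.headD []).length from by omega,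
      Int.toNat_natCast,
      show ((0:Int) ≤ (i:Int)) from by omega,
      show ((i:Int) < (mat.length:Int)) from by omega,
      show ((0:Int) ≤ (j:Int)) from by omega,
      show ((j:Int) < ((mat.headD []).length:Int)) from by omega,
      h1, h2, true_and, and_true, false_and, and_false, if_true, if_false,
      ite_true, ite_false, add_zero, zero_add]
    ring

-- ===== VERDICT (by name: the statement is the Claim_ definition above) =====
theorem add_neighbors_spec : Claim_equal_add_neighbors := by
  intro mat _ _
  unfold Spec_add_neighbors
  exact AB mat
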